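-- pv_equiv track=rewrite | github.com/Fillz/AOC-2024 | day15/part2.py | move_items
-- ===== SOURCE A (Python) =====
-- def move_items(map, x, y, dx, dy):
--   if map[y][x] == "#":
--     return (False, [])
--   if map[y][x] == ".":
--     return (True, [])
--   if dy != 0:
--     if map[y + dy][x + dx] == "[":
--       left_able_to_move, left_list_to_move = move_items(map, x, y + dy, dx, dy)
--       right_able_to_move, right_list_to_move = move_items(map, x + 1, y + dy, dx, dy)
--       able_to_move = left_able_to_move and right_able_to_move
--       list_to_move = left_list_to_move + right_list_to_move
--     elif map[y + dy][x + dx] == "]":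
--       left_able_to_move, left_list_to_move = move_items(map, x - 1, y + dy, dx, dy)
--       right_able_to_move, right_list_to_move = move_items(map, x, y + dy, dx, dy)
--       able_to_move = left_able_to_move and right_able_to_move
--       list_to_move = left_list_to_move + right_list_to_move
--     else:
--       able_to_move, list_to_move = move_items(map, x, y + dy, dx, dy)
--   else:
--     able_to_move, list_to_move = move_items(map, x + dx, y + dy, dx, dy)
--   return (able_to_move, list_to_move + [(x, y)])
-- ===== SOURCE B (Python) =====
-- def move_items(map, x, y, dx, dy):
--   # Iterative version: explicit LIFO stack, emits cells in reverse post-order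
--   # (node before its subtrees, right subtree before left) and reverses at the end.
--   able = True
--   moved = []
--   stack = [(x, y)]
--   while stack:
--     cx, cy = stack.pop()
--     c = map[cy][cx]
--     if c == "#":
--       able = False
--       continue
--     if c == ".":
--       continue
--     moved.append((cx, cy))
--     if dy != 0:
--       n = map[cy + dy][cx + dx]
--       if n == "[":
--         stack.append((cx, cy + dy))
--         stack.append((cx + 1, cy + dy))
--       elif n == "]":
--         stack.append((cx - 1, cy + dy))
--         stack.append((cx, cy + dy))
--       else:
--         stack.append((cx, cy + dy))
--     else:
--       stack.append((cx + dx, cy))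
--   moved.reverse()
--   return (able, moved)
-- ===== Notes on version B (the rewrite author's own statement) =====
-- stated objective: alternative
-- what changed: Replaces the mutual recursion (post-order, left++right++[cell]) by an iterative explicit LIFO stack that emits each cell before its subtrees with the right subtree scheduled first and reverses the accumulator once at the end, AND-ing the '#'/'.' base booleans in a flag.
-- outside the precondition, e.g. on move_items(['@', '.'], 0, 0, 0, 1): A returns (True, [(0, 0)]), B returns (True, [(0, 0)]); on move_items(['@#'], 0, 0, 1, 0): A returns (False, [(0, 0)]), B returns (False, [(0, 0)])
import Mathlib
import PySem

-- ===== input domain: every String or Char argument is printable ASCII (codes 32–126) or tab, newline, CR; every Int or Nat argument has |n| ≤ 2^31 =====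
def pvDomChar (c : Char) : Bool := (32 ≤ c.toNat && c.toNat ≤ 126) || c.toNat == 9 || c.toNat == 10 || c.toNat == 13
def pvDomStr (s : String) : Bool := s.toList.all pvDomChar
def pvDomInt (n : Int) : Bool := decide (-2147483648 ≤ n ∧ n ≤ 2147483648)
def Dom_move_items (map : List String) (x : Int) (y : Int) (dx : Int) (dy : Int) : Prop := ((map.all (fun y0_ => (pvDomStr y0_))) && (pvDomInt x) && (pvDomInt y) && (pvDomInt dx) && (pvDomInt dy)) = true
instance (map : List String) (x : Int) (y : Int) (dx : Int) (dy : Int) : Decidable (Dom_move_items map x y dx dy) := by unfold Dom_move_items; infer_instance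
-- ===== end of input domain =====

-- B replaces the mutual recursion by an explicit LIFO stack (reverse post-order emission,
-- right subtree scheduled first, one final reverse); objective: alternative decomposition.

-- ===== PORT A =====
-- map[y][x], Python semantics (negative indices wrap, out of range = none)
def pvCell (map : List String) (x : Int) (y : Int) : Option Char :=
  match PySem.List.pyGet? map y with
  | none => none
  | some row => PySem.Str.pyGet? row x

-- fuel guard for totality only: the recursion depth is bounded by height+width under Pre_
def pvFuelA (map : List String) : Nat := map.length + (map.headD "").toList.length + 1

def arec (map : List String) (dx : Int) (dy : Int) : Nat → Int → Int → Option (Bool × List (Int × Int))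
  | 0, _, _ => none
  | f+1, x, y =>
    match pvCell map x y with
    | none => none
    | some c =>
      if c = '#' then some (false, [])
      else if c = '.' then some (true, [])
      else if dy ≠ 0 then
        match pvCell map (x + dx) (y + dy) with
        | none => none
        | some n =>
          if n = '[' then
            match arec map dx dy f x (y + dy), arec map dx dy f (x + 1) (y + dy) with
            | some (lb, ll), some (rb, rl) => some (lb && rb, (ll ++ rl) ++ [(x, y)])
            | _, _ => none
          else if n = ']' then
            match arec map dx dy f (x - 1) (y + dy), arec map dx dy f x (y + dy) with
            | some (lb, ll), some (rb, rl) => some (lb && rb, (ll ++ rl) ++ [(x, y)])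
            | _, _ => none
          else
            match arec map dx dy f x (y + dy) with
            | some (b, l) => some (b, l ++ [(x, y)])
            | none => none
      else
        match arec map dx dy f (x + dx) (y + dy) with
        | some (b, l) => some (b, l ++ [(x, y)])
        | none => none

def move_items (map : List String) (x : Int) (y : Int) (dx : Int) (dy : Int) : Bool × (List (Int × Int)) :=
  (arec map dx dy (pvFuelA map) x y).getD (false, [])

-- ===== PORT B =====
-- fuel guard for totality only: bounds the number of while-loop iterations under Pre_
def pvFuelB (map : List String) : Nat := 3 ^ (pvFuelA map + 1)

def brun (map : List String) (dx : Int) (dy : Int) : Nat → List (Int × Int) → Bool → List (Int × Int) → Option (Bool × List (Int × Int))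
  | 0, _, _, _ => none
  | f+1, stack, able, acc =>
    match stack with
    | [] => some (able, acc.reverse)
    | (cx, cy) :: st =>
      match pvCell map cx cy with
      | none => none
      | some c =>
        if c = '#' then brun map dx dy f st false acc
        else if c = '.' then brun map dx dy f st able acc
        else if dy ≠ 0 then
          match pvCell map (cx + dx) (cy + dy) with
          | none => none
          | some n =>
            if n = '[' then brun map dx dy f ((cx + 1, cy + dy) :: (cx, cy + dy) :: st) able (acc ++ [(cx, cy)])
            else if n = ']' then brun map dx dy f ((cx, cy + dy) :: (cx - 1, cy + dy) :: st) able (acc ++ [(cx, cy)])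
            else brun map dx dy f ((cx, cy + dy) :: st) able (acc ++ [(cx, cy)])
        else brun map dx dy f ((cx + dx, cy) :: st) able (acc ++ [(cx, cy)])

def move_items_alt (map : List String) (x : Int) (y : Int) (dx : Int) (dy : Int) : Bool × (List (Int × Int)) :=
  (brun map dx dy (pvFuelB map) [(x, y)] true []).getD (false, [])

-- ===== PRECONDITION & SPEC =====
-- Pre_ admits the immediate base cases (the start cell reads '#' or '.') and otherwise restricts
-- to the function's natural domain — a rectangular map bordered by '#' on all four sides with a
-- unit move direction and an in-range start — since outside it the mutual recursion can overrun
-- the grid (IndexError) or recurse forever (RecursionError when dx = dy = 0).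
def Pre_move_items (map : List String) (x : Int) (y : Int) (dx : Int) (dy : Int) : Prop :=
  (pvCell map x y = some '#' ∨ pvCell map x y = some '.') ∨
  ((dx = 0 ∧ (dy = 1 ∨ dy = -1)) ∨ (dy = 0 ∧ (dx = 1 ∨ dx = -1))) ∧
  0 ≤ x ∧ x < ((map.headD "").toList.length : Int) ∧
  0 ≤ y ∧ y < (map.length : Int) ∧
  (map.all (fun s => (s.toList.length == (map.headD "").toList.length)
      && (s.toList.head? == some '#') && (s.toList.getLast? == some '#'))) = true ∧
  ((map.headD "").toList.all (fun c => c == '#')) = true ∧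
  ((map.getLastD "").toList.all (fun c => c == '#')) = true
instance (map : List String) (x : Int) (y : Int) (dx : Int) (dy : Int) : Decidable (Pre_move_items map x y dx dy) := by unfold Pre_move_items; infer_instance

def pvWitness_move_items : List String × Int × Int × Int × Int := (["###", "#.#", "###"], 1, 1, 0, 1)

def Spec_move_items (map : List String) (x : Int) (y : Int) (dx : Int) (dy : Int) (out : Bool × (List (Int × Int))) : Prop := out = move_items_alt map x y dx dy
instance (map : List String) (x : Int) (y : Int) (dx : Int) (dy : Int) (out : Bool × (List (Int × Int))) : Decidable (Spec_move_items map x y dx dy out) := by unfold Spec_move_items; infer_instance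

-- ===== CLAIM (what is proved, stated in full; the proofs are below) =====
def Claim_equal_move_items : Prop := ∀ (map : List String) (x : Int) (y : Int) (dx : Int) (dy : Int), Dom_move_items map x y dx dy → Pre_move_items map x y dx dy → Spec_move_items map x y dx dy (move_items map x y dx dy)

-- ===== LEMMAS AND PROOFS =====

def pvch (map : List String) (x : Int) (y : Int) : Char :=
  ((map.getD y.toNat "").toList.getD x.toNat ' ')

theorem headD_eq_getD (map : List String) (h : map ≠ []) : map.headD "" = map.getD 0 "" := by
  cases map with
  | nil => simp at h
  | cons a l => rfl

theorem getLastD_eq_getD (map : List String) (_h : map ≠ []) :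
    map.getLastD "" = map.getD (map.length - 1) "" := by
  rw [List.getLastD_eq_getLast?, List.getLast?_eq_getElem?]
  rw [List.getD_eq_getElem?_getD]

-- side columns are '#'
theorem side_char (map : List String) (x y : Int)
    (hside : ∀ s ∈ map, s.toList.head? = some '#' ∧ s.toList.getLast? = some '#')
    (hy0 : 0 ≤ y) (hy : y < (map.length : Int))
    (hx0 : 0 ≤ x) (hx : x < ((map.getD y.toNat "").toList.length : Int))
    (hedge : x = 0 ∨ x = ((map.getD y.toNat "").toList.length : Int) - 1) :
    pvch map x y = '#' := by
  have hyn : y.toNat < map.length := by omega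
  have hmem : map.getD y.toNat "" ∈ map := by
    rw [List.getD_eq_getElem _ _ hyn]; exact List.getElem_mem _
  obtain ⟨hh, hl⟩ := hside _ hmem
  set row := (map.getD y.toNat "").toList with hrow
  have hlen : 0 < row.length := by omega
  rcases hedge with he | he
  · have hxz : x.toNat = 0 := by omega
    have h0 : row.head? = row[0]? := List.head?_eq_getElem?
    rw [hh, List.getElem?_eq_getElem hlen] at h0
    rw [pvch, ← hrow, hxz, List.getD_eq_getElem _ _ hlen]
    exact (Option.some.inj h0).symm
  · have hxl : x.toNat = row.length - 1 := by omega
    have hlt : row.length - 1 < row.length := by omega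
    have h0 : row.getLast? = row[row.length - 1]? := List.getLast?_eq_getElem?
    rw [hl, List.getElem?_eq_getElem hlt] at h0
    rw [pvch, ← hrow, hxl, List.getD_eq_getElem _ _ hlt]
    exact (Option.some.inj h0).symm

theorem topbot_char (map : List String) (x y : Int)
    (htop : ∀ c ∈ (map.headD "").toList, c = '#')
    (hbot : ∀ c ∈ (map.getLastD "").toList, c = '#')
    (hy0 : 0 ≤ y) (hy : y < (map.length : Int))
    (hx0 : 0 ≤ x) (hx : x < ((map.getD y.toNat "").toList.length : Int))
    (hedge : y = 0 ∨ y = (map.length : Int) - 1) :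
    pvch map x y = '#' := by
  have hne : map ≠ [] := by
    intro h; subst h; simp at hy; omega
  set row := (map.getD y.toNat "").toList with hrow
  have hxn : x.toNat < row.length := by omega
  have hmemc : row.getD x.toNat ' ' ∈ row := by
    rw [List.getD_eq_getElem _ _ hxn]; exact List.getElem_mem _
  rcases hedge with he | he
  · have hyz : y.toNat = 0 := by omega
    have : (map.headD "").toList = row := by
      rw [headD_eq_getD map hne, hrow, hyz]
    exact htop _ (this ▸ hmemc)
  · have hyl : y.toNat = map.length - 1 := by omega
    have : (map.getLastD "").toList = row := by
      rw [getLastD_eq_getD map hne, hrow, hyl]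
    exact hbot _ (this ▸ hmemc)

theorem pvCell_in_range (map : List String) (x y : Int)
    (hy0 : 0 ≤ y) (hy : y < (map.length : Int))
    (hx0 : 0 ≤ x) (hx : x < (((map.getD y.toNat "").toList.length : Int))) :
    pvCell map x y = some (pvch map x y) := by
  have hyn : y.toNat < map.length := by omega
  have hrow : map.getD y.toNat "" = map[y.toNat] := List.getD_eq_getElem _ _ hyn
  have hxn : x.toNat < (map[y.toNat]).toList.length := by rw [← hrow]; omega
  unfold pvCell
  rw [PySem.List.pyGet?_eq_some_getElem map hy0 hy]
  simp only [PySem.Str.pyGet?_eq, PySem.Chars.pyGet?_eq_listPyGet?]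
  rw [PySem.List.pyGet?_eq_some_getElem _ hx0 (by omega : x < ((map[y.toNat]).toList.length : Int))]
  unfold pvch
  rw [hrow, List.getD_eq_getElem _ _ hxn]

theorem brun_mono (map : List String) (dx dy : Int) :
    ∀ (f g : Nat), f ≤ g → ∀ st able acc r, brun map dx dy f st able acc = some r →
      brun map dx dy g st able acc = some r := by
  intro f
  induction f with
  | zero => intro g _ st able acc r h; simp [brun] at h
  | succ f ih =>
    intro g hg st able acc r h
    obtain ⟨g', rfl⟩ : ∃ g', g = g' + 1 := ⟨g - 1, by omega⟩
    have hfg : f ≤ g' := by omega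
    cases st with
    | nil => simpa [brun] using h
    | cons p st =>
      obtain ⟨cx, cy⟩ := p
      simp only [brun] at h ⊢
      cases hc : pvCell map cx cy with
      | none => rw [hc] at h; dsimp only at h; exact absurd h (by simp)
      | some c =>
        rw [hc] at h
        dsimp only at h ⊢
        split_ifs at h ⊢
        · exact ih g' hfg _ _ _ _ h
        · exact ih g' hfg _ _ _ _ h
        · cases hn : pvCell map (cx + dx) (cy + dy) with
          | none => rw [hn] at h; dsimp only at h; exact absurd h (by simp)
          | some n =>
            rw [hn] at h
            dsimp only at h ⊢
            split_ifs at h ⊢ <;> exact ih g' hfg _ _ _ _ h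
        · exact ih g' hfg _ _ _ _ h

theorem sim (map : List String) (dx dy : Int) :
    ∀ (fa : Nat) (x y : Int) (b : Bool) (l : List (Int × Int)),
      arec map dx dy fa x y = some (b, l) →
      ∀ (f : Nat) st able acc r,
        brun map dx dy f st (able && b) (acc ++ l.reverse) = some r →
        brun map dx dy (f + 3 ^ fa) ((x, y) :: st) able acc = some r := by
  intro fa
  induction fa with
  | zero => intro x y b l h; simp [arec] at h
  | succ fa ih =>
    intro x y b l h f st able acc r hb
    rw [arec] at h
    have hpow : 1 ≤ 3 ^ fa := Nat.one_le_pow _ _ (by omega)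
    have hpow3 : 3 ^ (fa + 1) = 3 ^ fa * 3 := pow_succ 3 fa
    obtain ⟨g, hg⟩ : ∃ g, f + 3 ^ (fa + 1) = g + 1 := ⟨f + 3 ^ (fa + 1) - 1, by omega⟩
    cases hc : pvCell map x y with
    | none => rw [hc] at h; dsimp only at h; exact absurd h (by simp)
    | some c =>
      rw [hc] at h; dsimp only at h
      by_cases h1 : c = '#'
      · rw [if_pos h1] at h
        obtain ⟨rfl, rfl⟩ : false = b ∧ [] = l := by
          simpa only [Option.some.injEq, Prod.mk.injEq] using h
        simp only [Bool.and_false, List.reverse_nil, List.append_nil] at hb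
        rw [hg]
        have hstep : brun map dx dy (g + 1) ((x, y) :: st) able acc
            = brun map dx dy g st false acc := by
          simp only [brun, hc]; rw [if_pos h1]
        rw [hstep]
        exact brun_mono map dx dy f g (by omega) _ _ _ _ hb
      · rw [if_neg h1] at h
        by_cases h2 : c = '.'
        · rw [if_pos h2] at h
          obtain ⟨rfl, rfl⟩ : true = b ∧ [] = l := by
            simpa only [Option.some.injEq, Prod.mk.injEq] using h
          simp only [Bool.and_true, List.reverse_nil, List.append_nil] at hb
          rw [hg]
          have hstep : brun map dx dy (g + 1) ((x, y) :: st) able acc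
              = brun map dx dy g st able acc := by
            simp only [brun, hc]; rw [if_neg h1, if_pos h2]
          rw [hstep]
          exact brun_mono map dx dy f g (by omega) _ _ _ _ hb
        · rw [if_neg h2] at h
          by_cases h3 : dy ≠ 0
          · rw [if_pos h3] at h
            cases hn : pvCell map (x + dx) (y + dy) with
            | none => rw [hn] at h; dsimp only at h; exact absurd h (by simp)
            | some n =>
              rw [hn] at h; dsimp only at h
              by_cases h4 : n = '['
              · rw [if_pos h4] at h
                cases hL : arec map dx dy fa x (y + dy) with
                | none => rw [hL] at h; dsimp only at h; exact absurd h (by simp)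
                | some pl =>
                  cases hR : arec map dx dy fa (x + 1) (y + dy) with
                  | none => rw [hL, hR] at h; dsimp only at h; exact absurd h (by simp)
                  | some pr =>
                    obtain ⟨lb, ll⟩ := pl; obtain ⟨rb, rl⟩ := pr
                    rw [hL, hR] at h; dsimp only at h
                    obtain ⟨hbeq, hleq⟩ : ((lb && rb) = b) ∧ ((ll ++ rl) ++ [(x, y)] = l) := by
                      simpa only [Option.some.injEq, Prod.mk.injEq] using h
                    subst hbeq; subst hleq
                    have e1 : (able && (lb && rb)) = ((able && rb) && lb) := by
                      cases able <;> cases lb <;> cases rb <;> rfl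
                    have e2 : acc ++ ((ll ++ rl) ++ [(x, y)]).reverse
                        = ((acc ++ [(x, y)]) ++ rl.reverse) ++ ll.reverse := by
                      simp [List.reverse_append, List.append_assoc]
                    rw [e1, e2] at hb
                    have s1 := ih x (y + dy) lb ll hL f st (able && rb)
                      ((acc ++ [(x, y)]) ++ rl.reverse) r hb
                    have s2 := ih (x + 1) (y + dy) rb rl hR (f + 3 ^ fa)
                      ((x, y + dy) :: st) able (acc ++ [(x, y)]) r s1
                    rw [hg]
                    have hstep : brun map dx dy (g + 1) ((x, y) :: st) able acc
                        = brun map dx dy g ((x + 1, y + dy) :: (x, y + dy) :: st) able (acc ++ [(x, y)]) := by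
                      simp only [brun, hc, hn]; rw [if_neg h1, if_neg h2, if_pos h3, if_pos h4]
                    rw [hstep]
                    exact brun_mono map dx dy (f + 3 ^ fa + 3 ^ fa) g (by omega) _ _ _ _ s2
              · rw [if_neg h4] at h
                by_cases h5 : n = ']'
                · rw [if_pos h5] at h
                  cases hL : arec map dx dy fa (x - 1) (y + dy) with
                  | none => rw [hL] at h; dsimp only at h; exact absurd h (by simp)
                  | some pl =>
                    cases hR : arec map dx dy fa x (y + dy) with
                    | none => rw [hL, hR] at h; dsimp only at h; exact absurd h (by simp)
                    | some pr =>
                      obtain ⟨lb, ll⟩ := pl; obtain ⟨rb, rl⟩ := pr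
                      rw [hL, hR] at h; dsimp only at h
                      obtain ⟨hbeq, hleq⟩ : ((lb && rb) = b) ∧ ((ll ++ rl) ++ [(x, y)] = l) := by
                        simpa only [Option.some.injEq, Prod.mk.injEq] using h
                      subst hbeq; subst hleq
                      have e1 : (able && (lb && rb)) = ((able && rb) && lb) := by
                        cases able <;> cases lb <;> cases rb <;> rfl
                      have e2 : acc ++ ((ll ++ rl) ++ [(x, y)]).reverse
                          = ((acc ++ [(x, y)]) ++ rl.reverse) ++ ll.reverse := by
                        simp [List.reverse_append, List.append_assoc]
                      rw [e1, e2] at hb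
                      have s1 := ih (x - 1) (y + dy) lb ll hL f st (able && rb)
                        ((acc ++ [(x, y)]) ++ rl.reverse) r hb
                      have s2 := ih x (y + dy) rb rl hR (f + 3 ^ fa)
                        ((x - 1, y + dy) :: st) able (acc ++ [(x, y)]) r s1
                      rw [hg]
                      have hstep : brun map dx dy (g + 1) ((x, y) :: st) able acc
                          = brun map dx dy g ((x, y + dy) :: (x - 1, y + dy) :: st) able (acc ++ [(x, y)]) := by
                        simp only [brun, hc, hn]; rw [if_neg h1, if_neg h2, if_pos h3, if_neg h4, if_pos h5]
                      rw [hstep]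
                      exact brun_mono map dx dy (f + 3 ^ fa + 3 ^ fa) g (by omega) _ _ _ _ s2
                · rw [if_neg h5] at h
                  cases hC : arec map dx dy fa x (y + dy) with
                  | none => rw [hC] at h; dsimp only at h; exact absurd h (by simp)
                  | some pc =>
                    obtain ⟨cb, cl⟩ := pc
                    rw [hC] at h; dsimp only at h
                    obtain ⟨hbeq, hleq⟩ : (cb = b) ∧ (cl ++ [(x, y)] = l) := by
                      simpa only [Option.some.injEq, Prod.mk.injEq] using h
                    subst hbeq; subst hleq
                    have e2 : acc ++ (cl ++ [(x, y)]).reverse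
                        = (acc ++ [(x, y)]) ++ cl.reverse := by
                      simp [List.reverse_append, List.append_assoc]
                    rw [e2] at hb
                    have s1 := ih x (y + dy) cb cl hC f st able (acc ++ [(x, y)]) r hb
                    rw [hg]
                    have hstep : brun map dx dy (g + 1) ((x, y) :: st) able acc
                        = brun map dx dy g ((x, y + dy) :: st) able (acc ++ [(x, y)]) := by
                      simp only [brun, hc, hn]; rw [if_neg h1, if_neg h2, if_pos h3, if_neg h4, if_neg h5]
                    rw [hstep]
                    exact brun_mono map dx dy (f + 3 ^ fa) g (by omega) _ _ _ _ s1
          · rw [if_neg h3] at h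
            have hdy0 : dy = 0 := by omega
            subst hdy0
            cases hC : arec map dx 0 fa (x + dx) (y + 0) with
            | none => rw [hC] at h; dsimp only at h; exact absurd h (by simp)
            | some pc =>
              obtain ⟨cb, cl⟩ := pc
              rw [hC] at h; dsimp only at h
              obtain ⟨hbeq, hleq⟩ : (cb = b) ∧ (cl ++ [(x, y)] = l) := by
                simpa only [Option.some.injEq, Prod.mk.injEq] using h
              subst hbeq; subst hleq
              have e2 : acc ++ (cl ++ [(x, y)]).reverse
                  = (acc ++ [(x, y)]) ++ cl.reverse := by
                simp [List.reverse_append, List.append_assoc]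
              rw [e2] at hb
              have s1 := ih (x + dx) (y + 0) cb cl hC f st able (acc ++ [(x, y)]) r hb
              rw [hg]
              have hstep : brun map dx 0 (g + 1) ((x, y) :: st) able acc
                  = brun map dx 0 g ((x + dx, y) :: st) able (acc ++ [(x, y)]) := by
                simp only [brun, hc]; rw [if_neg h1, if_neg h2, if_neg h3]
              rw [hstep]
              simp only [add_zero] at s1
              exact brun_mono map dx 0 (f + 3 ^ fa) g (by omega) _ _ _ _ s1


theorem rowlen_eq (map : List String)
    (hlen : ∀ s ∈ map, s.toList.length = (map.headD "").toList.length)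
    (y : Int) (hy0 : 0 ≤ y) (hy : y < (map.length : Int)) :
    (map.getD y.toNat "").toList.length = (map.headD "").toList.length := by
  have hyn : y.toNat < map.length := by omega
  exact hlen _ (by rw [List.getD_eq_getElem _ _ hyn]; exact List.getElem_mem _)

theorem arec_some (map : List String) (dx dy : Int)
    (hdir : (dx = 0 ∧ (dy = 1 ∨ dy = -1)) ∨ (dy = 0 ∧ (dx = 1 ∨ dx = -1)))
    (hlen : ∀ s ∈ map, s.toList.length = (map.headD "").toList.length)
    (hside : ∀ s ∈ map, s.toList.head? = some '#' ∧ s.toList.getLast? = some '#')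
    (htop : ∀ c ∈ (map.headD "").toList, c = '#')
    (hbot : ∀ c ∈ (map.getLastD "").toList, c = '#') :
    ∀ (f : Nat) (x y : Int), 0 ≤ x → x < ((map.headD "").toList.length : Int) →
      0 ≤ y → y < (map.length : Int) →
      (if dy = 1 then (map.length : Int) - y else if dy = -1 then y + 1
        else if dx = 1 then ((map.headD "").toList.length : Int) - x else x + 1) ≤ (f : Int) →
      ∃ r, arec map dx dy f x y = some r := by
  intro f
  induction f with
  | zero =>
    intro x y hx0 hx hy0 hy hm
    exfalso
    split_ifs at hm <;> omega
  | succ f ih =>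
    intro x y hx0 hx hy0 hy hm
    have hrl : ((map.getD y.toNat "").toList.length : Int)
        = ((map.headD "").toList.length : Int) := by
      rw [rowlen_eq map hlen y hy0 hy]
    have hcell := pvCell_in_range map x y hy0 hy hx0 (by omega)
    by_cases h1 : pvch map x y = '#'
    · refine ⟨(false, []), ?_⟩
      simp only [arec, hcell]
      rw [if_pos h1]
    by_cases h2 : pvch map x y = '.'
    · refine ⟨(true, []), ?_⟩
      simp only [arec, hcell]
      rw [if_neg h1, if_pos h2]
    rcases hdir with ⟨hdx, hdyv⟩ | ⟨hdy, hdxv⟩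
    · -- vertical move: dx = 0, dy = ±1
      subst hdx
      have hyne : ¬ (y = 0 ∨ y = (map.length : Int) - 1) := fun he =>
        h1 (topbot_char map x y htop hbot hy0 hy hx0 (by omega) he)
      push Not at hyne
      have hy0' : 0 ≤ y + dy := by rcases hdyv with h | h <;> omega
      have hy' : y + dy < (map.length : Int) := by rcases hdyv with h | h <;> omega
      have hrl' : ((map.getD (y + dy).toNat "").toList.length : Int)
          = ((map.headD "").toList.length : Int) := by
        rw [rowlen_eq map hlen (y + dy) hy0' hy']
      have hcell2 := pvCell_in_range map x (y + dy) hy0' hy' hx0 (by omega)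
      have hdyne : dy ≠ 0 := by rcases hdyv with h | h <;> omega
      by_cases h4 : pvch map x (y + dy) = '['
      · have hxr : x + 1 < ((map.headD "").toList.length : Int) := by
          by_contra hc
          have := side_char map x (y + dy) hside hy0' hy' hx0 (by omega) (Or.inr (by omega))
          rw [h4] at this
          exact absurd this (by decide)
        obtain ⟨⟨b1, l1⟩, hr1⟩ := ih x (y + dy) hx0 hx hy0' hy'
          (by split_ifs at hm ⊢ <;> omega)
        obtain ⟨⟨b2, l2⟩, hr2⟩ := ih (x + 1) (y + dy) (by omega) (by omega) hy0' hy'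
          (by split_ifs at hm ⊢ <;> omega)
        refine ⟨(b1 && b2, (l1 ++ l2) ++ [(x, y)]), ?_⟩
        simp only [arec, hcell]
        rw [if_neg h1, if_neg h2, if_pos hdyne]
        rw [show x + (0 : Int) = x from add_zero x, hcell2]
        dsimp only
        rw [if_pos h4, hr1, hr2]
      by_cases h5 : pvch map x (y + dy) = ']'
      · have hxl : 1 ≤ x := by
          by_contra hc
          have := side_char map x (y + dy) hside hy0' hy' hx0 (by omega) (Or.inl (by omega))
          rw [h5] at this
          exact absurd this (by decide)
        obtain ⟨⟨b1, l1⟩, hr1⟩ := ih (x - 1) (y + dy) (by omega) (by omega) hy0' hy'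
          (by split_ifs at hm ⊢ <;> omega)
        obtain ⟨⟨b2, l2⟩, hr2⟩ := ih x (y + dy) hx0 hx hy0' hy'
          (by split_ifs at hm ⊢ <;> omega)
        refine ⟨(b1 && b2, (l1 ++ l2) ++ [(x, y)]), ?_⟩
        simp only [arec, hcell]
        rw [if_neg h1, if_neg h2, if_pos hdyne]
        rw [show x + (0 : Int) = x from add_zero x, hcell2]
        dsimp only
        rw [if_neg h4, if_pos h5, hr1, hr2]
      · obtain ⟨⟨b1, l1⟩, hr1⟩ := ih x (y + dy) hx0 hx hy0' hy'
          (by split_ifs at hm ⊢ <;> omega)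
        refine ⟨(b1, l1 ++ [(x, y)]), ?_⟩
        simp only [arec, hcell]
        rw [if_neg h1, if_neg h2, if_pos hdyne]
        rw [show x + (0 : Int) = x from add_zero x, hcell2]
        dsimp only
        rw [if_neg h4, if_neg h5, hr1]
    · -- horizontal move: dy = 0, dx = ±1
      subst hdy
      have hxne : ¬ (x = 0 ∨ x = ((map.getD y.toNat "").toList.length : Int) - 1) := fun he =>
        h1 (side_char map x y hside hy0 hy hx0 (by omega) he)
      push Not at hxne
      have hx0' : 0 ≤ x + dx := by rcases hdxv with h | h <;> omega
      have hx' : x + dx < ((map.headD "").toList.length : Int) := by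
        rcases hdxv with h | h <;> omega
      obtain ⟨⟨b1, l1⟩, hr1⟩ := ih (x + dx) y hx0' hx' hy0 hy
        (by rcases hdxv with h | h <;> subst h <;> split_ifs at hm ⊢ <;> first | omega | (exfalso; assumption))
      refine ⟨(b1, l1 ++ [(x, y)]), ?_⟩
      simp only [arec, hcell]
      rw [if_neg h1, if_neg h2, if_neg (show ¬ (0 : Int) ≠ 0 by simp)]
      rw [show y + (0 : Int) = y from add_zero y, hr1]


theorem pvFuelB_ge (map : List String) : 2 ≤ pvFuelB map := by
  unfold pvFuelB
  have h1 : 1 ≤ 3 ^ pvFuelA map := Nat.one_le_pow _ _ (by omega)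
  have h3 : 3 ^ (pvFuelA map + 1) = 3 ^ pvFuelA map * 3 := pow_succ 3 (pvFuelA map)
  omega

theorem base_wall (map : List String) (x y dx dy : Int) (hc : pvCell map x y = some '#') :
    move_items map x y dx dy = (false, []) := by
  unfold move_items pvFuelA
  simp [arec, hc]

theorem base_free (map : List String) (x y dx dy : Int) (hc : pvCell map x y = some '.') :
    move_items map x y dx dy = (true, []) := by
  unfold move_items pvFuelA
  simp [arec, hc]

theorem base_wall_alt (map : List String) (x y dx dy : Int) (hc : pvCell map x y = some '#') :
    move_items_alt map x y dx dy = (false, []) := by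
  have h2 : brun map dx dy 2 [(x, y)] true [] = some (false, []) := by
    simp [brun, hc]
  have hm := brun_mono map dx dy 2 (pvFuelB map) (pvFuelB_ge map) _ _ _ _ h2
  unfold move_items_alt
  rw [hm]
  rfl

theorem base_free_alt (map : List String) (x y dx dy : Int) (hc : pvCell map x y = some '.') :
    move_items_alt map x y dx dy = (true, []) := by
  have h2 : brun map dx dy 2 [(x, y)] true [] = some (true, []) := by
    simp [brun, hc]
  have hm := brun_mono map dx dy 2 (pvFuelB map) (pvFuelB_ge map) _ _ _ _ h2
  unfold move_items_alt
  rw [hm]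
  rfl

-- ===== VERDICT (by name: the statement is the Claim_ definition above) =====
theorem move_items_spec : Claim_equal_move_items := by
  intro map x y dx dy hdom hpre
  unfold Spec_move_items
  rcases hpre with hbase | ⟨hdir, hx0, hx, hy0, hy, hrows, htopB, hbotB⟩
  · rcases hbase with hc | hc
    · rw [base_wall map x y dx dy hc, base_wall_alt map x y dx dy hc]
    · rw [base_free map x y dx dy hc, base_free_alt map x y dx dy hc]

  have hlen : ∀ s ∈ map, s.toList.length = (map.headD "").toList.length := by
    intro s hs
    have h := List.all_eq_true.mp hrows s hs
    simp only [Bool.and_eq_true, beq_iff_eq] at h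
    exact h.1.1
  have hside : ∀ s ∈ map, s.toList.head? = some '#' ∧ s.toList.getLast? = some '#' := by
    intro s hs
    have h := List.all_eq_true.mp hrows s hs
    simp only [Bool.and_eq_true, beq_iff_eq] at h
    exact ⟨h.1.2, h.2⟩
  have htop : ∀ c ∈ (map.headD "").toList, c = '#' := by
    intro c hc
    have h := List.all_eq_true.mp htopB c hc
    simpa using h
  have hbot : ∀ c ∈ (map.getLastD "").toList, c = '#' := by
    intro c hc
    have h := List.all_eq_true.mp hbotB c hc
    simpa using h
  have hfa : (pvFuelA map : Int)
      = (map.length : Int) + ((map.headD "").toList.length : Int) + 1 := by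
    unfold pvFuelA; push_cast; ring
  obtain ⟨⟨b, l⟩, hA⟩ := arec_some map dx dy hdir hlen hside htop hbot (pvFuelA map) x y
    hx0 hx hy0 hy (by rw [hfa]; split_ifs <;> omega)
  have hbase : brun map dx dy 1 [] (true && b) ([] ++ l.reverse) = some (b, l) := by
    simp [brun]
  have hmain := sim map dx dy (pvFuelA map) x y b l hA 1 [] true [] (b, l) hbase
  have hpow : 1 ≤ 3 ^ pvFuelA map := Nat.one_le_pow _ _ (by omega)
  have hpow3 : 3 ^ (pvFuelA map + 1) = 3 ^ pvFuelA map * 3 := pow_succ 3 (pvFuelA map)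
  have hfinal := brun_mono map dx dy (1 + 3 ^ pvFuelA map) (pvFuelB map)
    (by unfold pvFuelB; omega) _ _ _ _ hmain
  unfold move_items move_items_alt
  rw [hA, hfinal]
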